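-- pv_equiv track=rewrite | github.com/LeandroFGA1/UTN-Programacion-Integrador | app/auxiliares.py | paises_actuales
-- ===== SOURCE A (Python) =====
-- def paises_actuales(lista: list):
--     nombres_vistos = set()
--     contador_repetidos = 0
--     for pais in lista:
--         if not isinstance(pais, dict) or "nombre" not in pais:
--                 # si no cumple, pasar al siguiente elemento
--             continue
--
--         nombre = str(pais["nombre"]).strip().lower()
--
--         if nombre in nombres_vistos:
--             contador_repetidos += 1
--         else:
--             nombres_vistos.add(nombre)
--     return len(lista) - contador_repetidos
-- ===== SOURCE B (Python) =====
-- def paises_actuales(lista: list):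
--     # collect normalized names of the valid entries, count invalid ones separately,
--     # then sort the names and sweep once counting distinct values
--     nombres = [str(p["nombre"]).strip().lower()
--                for p in lista
--                if isinstance(p, dict) and "nombre" in p]
--     invalidos = len(lista) - len(nombres)
--     nombres.sort()
--     unicos = 0
--     for i in range(len(nombres)):
--         if i == 0 or nombres[i] != nombres[i - 1]:
--             unicos += 1
--     return invalidos + unicos
-- ===== Notes on version B (the rewrite author's own statement) =====
-- stated objective: alternative
-- what changed: Replaces the seen-set loop (membership set plus repeat counter) by a filterMap of normalized names, a sort, and a single adjacent-comparison sweep that counts distinct names, returning invalid_count + distinct_count.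
import Mathlib
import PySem

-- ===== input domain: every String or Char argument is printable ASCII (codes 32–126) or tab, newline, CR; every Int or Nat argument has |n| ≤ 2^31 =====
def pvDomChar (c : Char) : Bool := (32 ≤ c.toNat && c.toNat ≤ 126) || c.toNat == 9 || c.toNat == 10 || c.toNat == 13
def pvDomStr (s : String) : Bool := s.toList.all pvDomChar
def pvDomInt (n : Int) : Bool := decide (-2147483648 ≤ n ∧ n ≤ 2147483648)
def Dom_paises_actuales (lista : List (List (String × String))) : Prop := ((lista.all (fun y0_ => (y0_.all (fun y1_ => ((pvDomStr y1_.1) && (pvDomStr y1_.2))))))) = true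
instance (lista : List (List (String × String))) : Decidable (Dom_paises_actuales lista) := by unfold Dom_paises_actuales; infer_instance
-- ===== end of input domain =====

-- B replaces A's seen-set loop by filterMap of normalized names + sort + adjacent-comparison
-- sweep counting distinct names (alternative decomposition, same result).


-- ===== PORT A =====
def paises_actuales (lista : List (List (String × String))) : Int :=
  let st := lista.foldl
    (fun (s : PySem.Set String × Int) pais =>
      match PySem.Dict.get? (PySem.Dict.ofList pais) "nombre" with
      | none => s  -- not a dict / "nombre" missing: continue
      | some v =>
        let nombre := PySem.Str.lower (PySem.Str.strip v)
        if PySem.Set.contains s.1 nombre then (s.1, s.2 + 1)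
        else (PySem.Set.add s.1 nombre, s.2))
    (PySem.Set.empty, 0)
  (lista.length : Int) - st.2

-- ===== PORT B =====
-- adjacent-comparison sweep over the tail, given the previous element
def pvSweepAux (prev : String) : List String → Nat
  | [] => 0
  | n :: rest => (if n = prev then 0 else 1) + pvSweepAux n rest

-- number of distinct values in a sorted list: first element, plus each element ≠ its predecessor
def pvSweep : List String → Nat
  | [] => 0
  | n :: rest => 1 + pvSweepAux n rest

def paises_actuales_alt (lista : List (List (String × String))) : Int :=
  let nombres := lista.filterMap
    (fun p => (PySem.Dict.get? (PySem.Dict.ofList p) "nombre").map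
      (fun v => PySem.Str.lower (PySem.Str.strip v)))
  let invalidos : Int := (lista.length : Int) - (nombres.length : Int)
  let sorted := PySem.List.sorted nombres (fun x => x) false
  invalidos + (pvSweep sorted : Int)

-- ===== PRECONDITION & SPEC =====
def Spec_paises_actuales (lista : List (List (String × String))) (out : Int) : Prop := out = paises_actuales_alt lista
instance (lista : List (List (String × String))) (out : Int) : Decidable (Spec_paises_actuales lista out) := by unfold Spec_paises_actuales; infer_instance

-- ===== CLAIM (what is proved, stated in full; the proofs are below) =====
def Claim_equal_paises_actuales : Prop := ∀ (lista : List (List (String × String))), Dom_paises_actuales lista → Spec_paises_actuales lista (paises_actuales lista)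

-- ===== LEMMAS AND PROOFS =====

-- A's loop invariant: the pair after folding the remaining names over state (s, c)
theorem pv_fold_invariant (names : List String) (s : PySem.Set String) (c : Int) :
    names.foldl
      (fun (st : PySem.Set String × Int) n =>
        if PySem.Set.contains st.1 n then (st.1, st.2 + 1)
        else (PySem.Set.add st.1 n, st.2))
      (s, c)
    = (PySem.Set.update s names,
       c + (names.length : Int) - ((PySem.Set.update s names).length : Int) + (s.length : Int)) := by
  induction names generalizing s c with
  | nil => simp [PySem.Set.update]
  | cons n t ih =>
    have hupd : PySem.Set.update s (n :: t) = PySem.Set.update (PySem.Set.add s n) t := rfl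
    simp only [List.foldl_cons]
    cases hc : PySem.Set.contains s n with
    | true =>
      have hmem : n ∈ s := by simpa [PySem.Set.contains] using hc
      have hadd : PySem.Set.add s n = s := by simp [PySem.Set.add, hmem]
      simp only [if_pos]
      rw [ih, hupd, hadd]
      simp only [Prod.mk.injEq, List.length_cons]
      refine ⟨trivial, by push_cast; ring⟩
    | false =>
      have hmem : n ∉ s := by simpa [PySem.Set.contains] using hc
      have hlen : (PySem.Set.add s n).length = s.length + 1 := by
        simp [PySem.Set.add, hmem]
      simp only [Bool.false_eq_true, if_false]
      rw [ih, hupd, hlen]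
      simp only [Prod.mk.injEq, List.length_cons]
      refine ⟨trivial, by push_cast; ring⟩

-- the sweep over a ≤-sorted nonempty list counts its distinct values
theorem pv_sweepAux_card (rest : List String) : ∀ (prev : String),
    ((prev :: rest).Pairwise (· ≤ ·)) →
    1 + pvSweepAux prev rest = (prev :: rest).toFinset.card := by
  induction rest with
  | nil => intro prev _; simp [pvSweepAux]
  | cons n t ih =>
    intro prev hp
    have hp' : (n :: t).Pairwise (· ≤ ·) := hp.of_cons
    by_cases h : n = prev
    · subst h
      have := ih n hp'
      simp only [List.toFinset_cons, Finset.insert_idem] at this ⊢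
      simpa [pvSweepAux] using this
    · have hnotin : prev ∉ n :: t := by
        intro hmem
        rcases List.mem_cons.mp hmem with h1 | hmemt
        · exact h h1.symm
        · have h1 : prev ≤ n := (List.pairwise_cons.mp hp).1 n (List.mem_cons_self)
          have h2 : n ≤ prev := (List.pairwise_cons.mp hp').1 prev hmemt
          exact h (le_antisymm h2 h1)
      have hcard : (prev :: n :: t).toFinset.card = 1 + (n :: t).toFinset.card := by
        simp only [List.toFinset_cons]
        rw [Finset.card_insert_of_notMem (by simpa using hnotin)]
        omega
      simp only [pvSweepAux, if_neg h]
      rw [hcard, ← ih n hp']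

theorem pv_sweep_card (l : List String) (hl : l.Pairwise (· ≤ ·)) :
    pvSweep l = l.toFinset.card := by
  cases l with
  | nil => simp [pvSweep]
  | cons n t => exact pv_sweepAux_card t n hl

-- |set(xs)| = |toFinset xs|
theorem pv_ofList_length (xs : List String) :
    (PySem.Set.ofList xs).length = xs.toFinset.card := by
  have hnd : (PySem.Set.ofList xs).Nodup := PySem.Set.nodup_ofList xs
  have hset : (PySem.Set.ofList xs).toFinset = xs.toFinset := by
    ext x; simp [PySem.Set.mem_ofList]
  rw [← List.toFinset_card_of_nodup hnd, hset]

-- ===== VERDICT (by name: the statement is the Claim_ definition above) =====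
theorem paises_actuales_spec : Claim_equal_paises_actuales := by
  intro lista _
  unfold Spec_paises_actuales paises_actuales paises_actuales_alt
  dsimp only
  set names := lista.filterMap
    (fun p => (PySem.Dict.get? (PySem.Dict.ofList p) "nombre").map
      (fun v => PySem.Str.lower (PySem.Str.strip v))) with hnames
  have hfold : lista.foldl
      (fun (s : PySem.Set String × Int) pais =>
        match PySem.Dict.get? (PySem.Dict.ofList pais) "nombre" with
        | none => s
        | some v =>
          let nombre := PySem.Str.lower (PySem.Str.strip v)
          if PySem.Set.contains s.1 nombre then (s.1, s.2 + 1)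
          else (PySem.Set.add s.1 nombre, s.2))
      (PySem.Set.empty, 0)
      = names.foldl
      (fun (st : PySem.Set String × Int) n =>
        if PySem.Set.contains st.1 n then (st.1, st.2 + 1)
        else (PySem.Set.add st.1 n, st.2))
      (PySem.Set.empty, 0) := by
    rw [hnames, List.foldl_filterMap]
    apply PySem.List.foldl_congr_mem
    intro acc p _
    cases PySem.Dict.get? (PySem.Dict.ofList p) "nombre" <;> rfl
  rw [hfold, pv_fold_invariant]
  have hupd : PySem.Set.update PySem.Set.empty names = PySem.Set.ofList names := rfl
  have hsorted : (PySem.List.sorted names (fun x => x) false).Pairwise (· ≤ ·) :=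
    PySem.List.sorted_pairwise names (fun x => x)
  have hperm : (PySem.List.sorted names (fun x => x) false).Perm names :=
    PySem.List.sorted_perm names (fun x => x) false
  have hfin : (PySem.List.sorted names (fun x => x) false).toFinset = names.toFinset :=
    List.toFinset_eq_of_perm _ _ hperm
  rw [hupd, pv_sweep_card _ hsorted, hfin, ← pv_ofList_length]
  simp only [PySem.Set.empty, List.length_nil, Nat.cast_zero]
  ring
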